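-- pv_equiv track=rewrite | github.com/Trepan-Debuggers/python3-trepan | trepan/lib/complete.py | complete_token_with_next
-- ===== SOURCE A (Python) =====
-- def complete_token_with_next(complete_hash, prefix, cmd_prefix=""):
--     result = []
--     for cmd_name in list(complete_hash.keys()):
--         if cmd_name.startswith(cmd_prefix + prefix):
--             result.append([cmd_name[len(cmd_prefix) :], complete_hash[cmd_name]])
--             pass
--         pass
--     pass
--     return sorted(result, key=lambda pair: pair[0])
-- ===== SOURCE B (Python) =====
-- def _insert_sorted(result, pair):
--     # insert pair into the already-sorted result, keeping it sorted by pair[0]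
--     if not result or pair[0] < result[0][0]:
--         return [pair] + result
--     return [result[0]] + _insert_sorted(result[1:], pair)
--
--
-- def complete_token_with_next(complete_hash, prefix, cmd_prefix=""):
--     full = cmd_prefix + prefix
--     n = len(cmd_prefix)
--     result = []
--     for cmd_name in complete_hash:
--         if cmd_name.startswith(full):
--             result = _insert_sorted(result, [cmd_name[n:], complete_hash[cmd_name]])
--     return result
-- ===== Notes on version B (the rewrite author's own statement) =====
-- stated objective: alternative
-- what changed: B never calls sort: it keeps the result ordered at all times by inserting each matching stripped pair into its sorted position (an online insertion sort during the single scan), instead of A's filter-everything-then-sort-at-the-end.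
import Mathlib
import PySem

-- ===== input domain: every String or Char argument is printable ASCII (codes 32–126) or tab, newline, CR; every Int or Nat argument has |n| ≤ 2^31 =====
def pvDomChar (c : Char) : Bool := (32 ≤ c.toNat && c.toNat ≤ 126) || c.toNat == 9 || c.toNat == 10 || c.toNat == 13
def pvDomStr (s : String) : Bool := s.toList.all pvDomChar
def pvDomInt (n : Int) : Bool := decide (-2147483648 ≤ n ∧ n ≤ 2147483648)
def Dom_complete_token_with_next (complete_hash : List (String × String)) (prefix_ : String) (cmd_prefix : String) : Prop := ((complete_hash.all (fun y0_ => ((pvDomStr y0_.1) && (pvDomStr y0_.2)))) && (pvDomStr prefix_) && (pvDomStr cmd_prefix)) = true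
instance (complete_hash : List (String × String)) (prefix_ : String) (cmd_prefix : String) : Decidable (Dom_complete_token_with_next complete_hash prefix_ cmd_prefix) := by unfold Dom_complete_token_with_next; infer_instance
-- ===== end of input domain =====

-- B never calls sort: it keeps the result ordered at all times, inserting each matching
-- stripped pair into its sorted position during the single scan (online insertion sort);
-- an alternative to A's filter-then-sort, same result, no speed claim.

-- ===== PORT A =====
def complete_token_with_next (complete_hash : List (String × String)) (prefix_ : String) (cmd_prefix : String) : List (List String) :=
  let d := PySem.Dict.ofList complete_hash
  let result : List (List String) :=
    d.keys.foldl (fun result cmd_name =>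
      if PySem.Str.startswith cmd_name (cmd_prefix ++ prefix_) then
        result ++ [[PySem.Str.slice cmd_name (some (PySem.Str.len cmd_prefix)) none,
                    d.getD cmd_name ""]]
      else result) []
  PySem.List.sorted result (fun pair => PySem.List.pyGetD pair 0 "") false

-- ===== PORT B =====
-- _insert_sorted from Source B: structural recursion on the sorted result list
def pvInsertSorted : List (List String) → List String → List (List String)
  | [], pair => [pair]
  | p :: ps, pair =>
    if PySem.List.pyGetD pair 0 "" < PySem.List.pyGetD p 0 "" then pair :: p :: ps
    else p :: pvInsertSorted ps pair

def complete_token_with_next_alt (complete_hash : List (String × String)) (prefix_ : String) (cmd_prefix : String) : List (List String) :=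
  let d := PySem.Dict.ofList complete_hash
  let full := cmd_prefix ++ prefix_
  let n := PySem.Str.len cmd_prefix
  d.keys.foldl (fun result cmd_name =>
    if PySem.Str.startswith cmd_name full then
      pvInsertSorted result [PySem.Str.slice cmd_name (some n) none, d.getD cmd_name ""]
    else result) []

-- ===== PRECONDITION & SPEC =====
def Spec_complete_token_with_next (complete_hash : List (String × String)) (prefix_ : String) (cmd_prefix : String) (out : List (List String)) : Prop := out = complete_token_with_next_alt complete_hash prefix_ cmd_prefix
instance (complete_hash : List (String × String)) (prefix_ : String) (cmd_prefix : String) (out : List (List String)) : Decidable (Spec_complete_token_with_next complete_hash prefix_ cmd_prefix out) := by unfold Spec_complete_token_with_next; infer_instance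

-- ===== CLAIM (what is proved, stated in full; the proofs are below) =====
def Claim_equal_complete_token_with_next : Prop := ∀ (complete_hash : List (String × String)) (prefix_ : String) (cmd_prefix : String), Dom_complete_token_with_next complete_hash prefix_ cmd_prefix → Spec_complete_token_with_next complete_hash prefix_ cmd_prefix (complete_token_with_next complete_hash prefix_ cmd_prefix)

-- ===== LEMMAS AND PROOFS =====

-- key extractor used by A's sort and by B's insertion
def pvKey (p : List String) : String := PySem.List.pyGetD p 0 ""

theorem pvInsertSorted_perm (l : List (List String)) (pair : List String) :
    (pvInsertSorted l pair).Perm (pair :: l) := by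
  induction l with
  | nil => simp [pvInsertSorted]
  | cons p ps ih =>
    unfold pvInsertSorted
    split
    · exact List.Perm.refl _
    · exact (ih.cons p).trans (List.Perm.swap _ _ _)

theorem pvInsertSorted_sorted (l : List (List String)) (pair : List String)
    (h : l.Pairwise (fun a b => pvKey a ≤ pvKey b)) :
    (pvInsertSorted l pair).Pairwise (fun a b => pvKey a ≤ pvKey b) := by
  induction l with
  | nil => simp [pvInsertSorted]
  | cons p ps ih =>
    rcases List.pairwise_cons.mp h with ⟨hp, hps⟩
    unfold pvInsertSorted
    split
    · rename_i hlt
      refine List.pairwise_cons.mpr ⟨?_, h⟩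
      intro b hb
      rcases List.mem_cons.mp hb with rfl | hb2
      · exact le_of_lt hlt
      · exact le_trans (le_of_lt hlt) (hp b hb2)
    · rename_i hnlt
      refine List.pairwise_cons.mpr ⟨?_, ih hps⟩
      intro b hb
      have := (pvInsertSorted_perm ps pair).mem_iff.mp hb
      rcases List.mem_cons.mp this with rfl | h2
      · exact not_lt.mp hnlt
      · exact hp b h2

-- the fold of B is a permutation of acc ++ matches
theorem pv_fold_perm (q : String → Bool) (f : String → List String)
    (keys : List String) (acc : List (List String)) :
    (keys.foldl (fun r k => if q k then pvInsertSorted r (f k) else r) acc).Perm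
      (acc ++ (keys.filter q).map f) := by
  induction keys generalizing acc with
  | nil => simp
  | cons k ks ih =>
    by_cases hq : q k
    · simp only [List.foldl_cons, hq, if_pos, List.filter_cons_of_pos hq, List.map_cons]
      refine (ih (pvInsertSorted acc (f k))).trans ?_
      refine (List.Perm.append_right _ (pvInsertSorted_perm acc (f k))).trans ?_
      exact List.perm_middle.symm
    · simp only [List.foldl_cons, hq, List.filter_cons_of_neg hq]
      exact ih acc

-- the fold of B is sorted (≤ on keys)
theorem pv_fold_sorted (q : String → Bool) (f : String → List String)
    (keys : List String) (acc : List (List String))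
    (hacc : acc.Pairwise (fun a b => pvKey a ≤ pvKey b)) :
    (keys.foldl (fun r k => if q k then pvInsertSorted r (f k) else r) acc).Pairwise
      (fun a b => pvKey a ≤ pvKey b) := by
  induction keys generalizing acc with
  | nil => exact hacc
  | cons k ks ih =>
    by_cases hq : q k
    · simp only [List.foldl_cons, hq, if_pos]
      exact ih _ (pvInsertSorted_sorted acc (f k) hacc)
    · simp only [List.foldl_cons, hq]
      exact ih acc hacc

-- s[len(cp):] as a list of chars, for a nonnegative Nat-length index
theorem pv_toList_slice_drop (s cp : String) :
    (PySem.Str.slice s (some (PySem.Str.len cp)) none).toList = s.toList.drop cp.toList.length := by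
  rw [PySem.Str.len_eq]
  simp [PySem.Str.toList_slice, PySem.List.slice_from_natCast]

-- stripping the common cmd_prefix from two distinct matching keys keeps them distinct
theorem pv_key_ne (cp full a b : String) (hfull : cp.toList <+: full.toList)
    (ha : PySem.Str.startswith a full = true) (hb : PySem.Str.startswith b full = true)
    (hab : a ≠ b) :
    PySem.Str.slice a (some (PySem.Str.len cp)) none ≠ PySem.Str.slice b (some (PySem.Str.len cp)) none := by
  have ha' : full.toList <+: a.toList := by
    rw [PySem.Str.startswith_eq] at ha; exact (PySem.Chars.startswith_iff _ _).mp ha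
  have hb' : full.toList <+: b.toList := by
    rw [PySem.Str.startswith_eq] at hb; exact (PySem.Chars.startswith_iff _ _).mp hb
  obtain ⟨ra, hra⟩ := hfull.trans ha'
  obtain ⟨rb, hrb⟩ := hfull.trans hb'
  intro hEq
  have hL : (PySem.Str.slice a (some (PySem.Str.len cp)) none).toList
      = (PySem.Str.slice b (some (PySem.Str.len cp)) none).toList := by rw [hEq]
  rw [pv_toList_slice_drop, pv_toList_slice_drop, ← hra, ← hrb,
    List.drop_left, List.drop_left] at hL
  apply hab
  have : a.toList = b.toList := by rw [← hra, ← hrb, hL]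
  exact String.toList_injective this

-- ===== VERDICT (by name: the statement is the Claim_ definition above) =====
theorem complete_token_with_next_spec : Claim_equal_complete_token_with_next := by
  intro complete_hash prefix_ cmd_prefix _
  unfold Spec_complete_token_with_next
  dsimp only [complete_token_with_next, complete_token_with_next_alt]
  rw [PySem.List.foldl_append_if, List.nil_append]
  set d := PySem.Dict.ofList complete_hash with hd
  set q : String → Bool := fun k => PySem.Str.startswith k (cmd_prefix ++ prefix_) with hq
  set f : String → List String := fun k =>
    [PySem.Str.slice k (some (PySem.Str.len cmd_prefix)) none, d.getD k ""] with hf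
  set B := d.keys.foldl (fun r k => if q k then pvInsertSorted r (f k) else r) [] with hB
  have hperm : B.Perm ((d.keys.filter q).map f) := by
    simpa using pv_fold_perm q f d.keys []
  have hle : B.Pairwise (fun a b => pvKey a ≤ pvKey b) :=
    pv_fold_sorted q f d.keys [] (by simp)
  have hne : B.Pairwise (fun a b => pvKey a ≠ pvKey b) := by
    refine (hperm.pairwise_iff (fun {_ _} h => Ne.symm h)).mpr ?_
    rw [List.pairwise_map, List.pairwise_filter]
    have hnd : d.keys.Pairwise (· ≠ ·) := PySem.Dict.nodup_keys_ofList complete_hash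
    refine hnd.imp ?_
    intro a b h ha hb
    simp only [pvKey, hf, PySem.List.pyGetD_zero_cons]
    exact pv_key_ne cmd_prefix (cmd_prefix ++ prefix_) a b
      (by rw [String.toList_append]; exact List.prefix_append _ _) ha hb h
  have hlt : B.Pairwise (fun a b => pvKey a < pvKey b) :=
    (hle.and hne).imp (fun h => lt_of_le_of_ne h.1 h.2)
  exact PySem.List.sorted_eq_of_perm_of_pairwise_lt _ _ _ hperm hlt
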